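-- pv_equiv track=rewrite | github.com/jgbrock178/CMP1902M-Programming-Fundamentals-Assessment-2 | medal.py | make_sortable_numbers
-- ===== SOURCE A (Python) =====
-- def make_sortable_numbers(input_list):
--     """Combines nested lists of integers into one list that can be used to
--     compare and sort against each other, assuming each position takes
--     precedence over the following positions. I.e the first positions should be
--     sorted, then the second etc.
--
--     E.g. if the input is [[1, 3], [1, 13], [1, 2]] then the returned list would
--     be [103, 113, 102] which can be used to sort all columns in ascending order.
--
--     Args:
--         input_list (list of lists): The input list containing lists of integers.
--             Each list of integers will be combined into a sort-safe integer.
--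
--     Returns:
--         A single list of combined integers in the same order as passed in.
--     """
--
--     sub_list_count = len(input_list[0])
--
--     # Check to ensure all nested lists are the same.
--     for l in input_list:
--         if len(l) != sub_list_count:
--             raise AttributeError('Size of nested lists is not the same for every list')
--
--     column_counts = []
--     for i in range(sub_list_count):
--         col = [len(str(x[i])) for x in input_list]
--         column_counts.append(max(col))
--
--     output_list = []
--     for l in input_list:
--         row_number = ''
--         for i, val in enumerate(l):
--             row_number += str(val).zfill(column_counts[i])
--
--         output_list.append(row_number)
--
--     return output_list
-- ===== SOURCE B (Python) =====
-- def make_sortable_numbers(input_list):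
--     """Column-major re-implementation: for each column, compute string forms,
--     take the column width, and append the zero-padded cell onto each row's
--     accumulator; same exceptions as the original on empty/ragged input."""
--     sub_list_count = len(input_list[0])
--
--     for l in input_list:
--         if len(l) != sub_list_count:
--             raise AttributeError('Size of nested lists is not the same for every list')
--
--     output_list = ['' for _ in input_list]
--     for i in range(sub_list_count):
--         col = [str(row[i]) for row in input_list]
--         width = max(len(s) for s in col)
--         for j, s in enumerate(col):
--             output_list[j] += s.zfill(width)
--     return output_list
-- ===== Notes on version B (the rewrite author's own statement) =====
-- stated objective: alternative
-- what changed: B traverses column-major in a single pass per column that fuses width-finding and zero-padded formatting into per-row string accumulators, instead of A's separate widths table followed by a row-major formatting pass.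
import Mathlib
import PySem

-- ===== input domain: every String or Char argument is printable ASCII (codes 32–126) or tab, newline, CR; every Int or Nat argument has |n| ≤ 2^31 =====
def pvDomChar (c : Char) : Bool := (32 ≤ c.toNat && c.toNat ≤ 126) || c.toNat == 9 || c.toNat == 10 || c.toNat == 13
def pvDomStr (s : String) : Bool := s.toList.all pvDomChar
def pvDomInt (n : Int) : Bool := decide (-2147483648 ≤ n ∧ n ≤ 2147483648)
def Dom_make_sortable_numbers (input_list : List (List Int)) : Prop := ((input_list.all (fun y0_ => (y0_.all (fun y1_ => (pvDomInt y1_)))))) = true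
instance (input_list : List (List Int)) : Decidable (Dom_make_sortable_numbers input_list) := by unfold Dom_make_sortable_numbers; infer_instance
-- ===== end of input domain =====

-- B is an alternative column-major decomposition of A (same cost); equivalence is proved on Pre_ (non-empty, rectangular input, where A returns).

-- ===== PORT A =====
-- A: widths table per column, then a row-major pass formatting each row.
def make_sortable_numbers (input_list : List (List Int)) : List String :=
  let sub_list_count := (input_list.headD []).length
  if input_list.any (fun l => l.length ≠ sub_list_count) then []  -- AttributeError path, outside Pre_
  else
    let column_counts : List Int := (List.range sub_list_count).map
      (fun (i : Nat) => (input_list.map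
        (fun x => ((PySem.Int.toStr (PySem.List.pyGetD x (i : Int) 0)).length : Int))).foldl max 0)
    input_list.map (fun l =>
      (PySem.List.enumerate l 0).foldl
        (fun row_number p =>
          row_number ++ PySem.Str.zfill (PySem.Int.toStr p.2) (PySem.List.pyGetD column_counts p.1 0))
        "")

-- ===== PORT B =====
-- B: column-major; per column compute string forms and width, append padded cells onto per-row accumulators.
def make_sortable_numbers_alt (input_list : List (List Int)) : List String :=
  let sub_list_count := (input_list.headD []).length
  if input_list.any (fun l => l.length ≠ sub_list_count) then []  -- AttributeError path, outside Pre_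
  else
    (List.range sub_list_count).foldl
      (fun output_list (i : Nat) =>
        let col := input_list.map (fun row => PySem.Int.toStr (PySem.List.pyGetD row (i : Int) 0))
        let width : Int := (col.map (fun s => (s.length : Int))).foldl max 0
        List.zipWith (fun acc s => acc ++ PySem.Str.zfill s width) output_list col)
      (input_list.map (fun _ => ""))

-- ===== PRECONDITION & SPEC =====
-- Pre_ excludes exactly the inputs on which A raises: the empty list (IndexError on input_list[0])
-- and ragged inputs (the explicit AttributeError); B raises the same exceptions there.
def Pre_make_sortable_numbers (input_list : List (List Int)) : Prop :=
  input_list ≠ [] ∧ ∀ l ∈ input_list, l.length = (input_list.headD []).length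
instance (input_list : List (List Int)) : Decidable (Pre_make_sortable_numbers input_list) := by
  unfold Pre_make_sortable_numbers; infer_instance
def pvWitness_make_sortable_numbers : List (List Int) := [[1, 3], [1, 13], [1, 2]]
def Spec_make_sortable_numbers (input_list : List (List Int)) (out : List String) : Prop := out = make_sortable_numbers_alt input_list
instance (input_list : List (List Int)) (out : List String) : Decidable (Spec_make_sortable_numbers input_list out) := by unfold Spec_make_sortable_numbers; infer_instance

-- ===== CLAIM (what is proved, stated in full; the proofs are below) =====
def Claim_equal_make_sortable_numbers : Prop := ∀ (input_list : List (List Int)), Dom_make_sortable_numbers input_list → Pre_make_sortable_numbers input_list → Spec_make_sortable_numbers input_list (make_sortable_numbers input_list)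

-- ===== LEMMAS AND PROOFS =====

-- Column-major fold with per-row accumulators equals the row-major map of folds.
theorem colmajor_eq_rowmajor {α : Type} (n : Nat) (rows : List α)
    (g : Nat → String → String) (h : Nat → α → String) :
    (List.range n).foldl
      (fun out i => List.zipWith (fun acc s => acc ++ g i s) out (rows.map (h i)))
      (rows.map (fun _ => ""))
    = rows.map (fun r => (List.range n).foldl (fun acc i => acc ++ g i (h i r)) "") := by
  induction n with
  | zero => simp
  | succ n ih =>
      simp only [List.range_succ, List.foldl_append, List.foldl_cons, List.foldl_nil, ih]
      rw [List.zipWith_map, List.zipWith_self]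

-- A's per-row enumerate fold equals a range fold over the row's indices.
theorem enum_fold_eq_range_fold (l : List Int) (counts : List Int) (w : Nat → Int)
    (hc : counts = (List.range l.length).map w) :
    (PySem.List.enumerate l 0).foldl
      (fun row_number p =>
        row_number ++ PySem.Str.zfill (PySem.Int.toStr p.2) (PySem.List.pyGetD counts p.1 0))
      ""
    = (List.range l.length).foldl
        (fun acc (i : Nat) => acc ++ PySem.Str.zfill (PySem.Int.toStr (PySem.List.pyGetD l (i : Int) 0)) (w i)) "" := by
  rw [PySem.List.enumerate_eq_map_pyRange (d := 0), List.foldl_map,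
      show PySem.List.len l = (l.length : Int) from rfl,
      PySem.List.pyRange_zero_natCast, List.foldl_map]
  apply PySem.List.foldl_congr_mem
  intro acc i hi
  have hil : i < l.length := List.mem_range.mp hi
  have hcnt : PySem.List.pyGetD counts (i : Int) 0 = w i := by
    rw [hc, PySem.List.pyGetD_natCast]
    simp [List.getD_eq_getElem?_getD, hil]
  rw [hcnt]

-- ===== VERDICT (by name: the statement is the Claim_ definition above) =====
theorem make_sortable_numbers_spec : Claim_equal_make_sortable_numbers := by
  intro input_list _hdom hpre
  unfold Spec_make_sortable_numbers make_sortable_numbers make_sortable_numbers_alt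
  obtain ⟨-, hrect⟩ := hpre
  set n := (input_list.headD []).length with hn
  have hany : input_list.any (fun l => l.length ≠ n) = false := by
    simp only [List.any_eq_false]
    intro l hl
    simpa using hrect l hl
  simp only [hany, if_false, Bool.false_eq_true]
  rw [colmajor_eq_rowmajor n input_list
        (fun (i : Nat) s => PySem.Str.zfill s
          (((input_list.map (fun row => PySem.Int.toStr (PySem.List.pyGetD row (i : Int) 0))).map
            (fun s => (s.length : Int))).foldl max 0))
        (fun (i : Nat) row => PySem.Int.toStr (PySem.List.pyGetD row (i : Int) 0))]
  apply List.map_congr_left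
  intro l hl
  have hlen : l.length = n := hrect l hl
  rw [enum_fold_eq_range_fold l _
        (fun (i : Nat) => (input_list.map
          (fun x => ((PySem.Int.toStr (PySem.List.pyGetD x (i : Int) 0)).length : Int))).foldl max 0)
        (by rw [hlen])]
  rw [hlen]
  apply PySem.List.foldl_congr_mem
  intro acc i _
  simp [Function.comp_def]
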